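-- pv_equiv track=rewrite | github.com/PHILIPP111007/phils_language | src/parser.py | is_fully_parenthesized
-- ===== SOURCE A (Python) =====
-- def is_fully_parenthesized(expression: str) -> bool:
--     """Проверяет, полностью ли выражение заключено в скобки"""
--     if not expression.startswith("(") or not expression.endswith(")"):
--         return False
--
--     # Проверяем баланс скобок
--     balance = 0
--     for i, char in enumerate(expression):
--         if char == "(":
--             balance += 1
--         elif char == ")":
--             balance -= 1
--             # Если баланс стал 0 до конца строки, это не полное обрамление
--             if balance == 0 and i < len(expression) - 1:
--                 return False
--
--     return balance == 0
-- ===== SOURCE B (Python) =====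
-- def _skip_group(s):
--     """s is the text that follows an unmatched '('; return the suffix that
--     follows its matching ')', or None if that '(' is never closed."""
--     while s:
--         if s[0] == ")":
--             return s[1:]
--         if s[0] == "(":
--             s = _skip_group(s[1:])
--             if s is None:
--                 return None
--         else:
--             s = s[1:]
--     return None
--
--
-- def is_fully_parenthesized(expression: str) -> bool:
--     """Проверяет, полностью ли выражение заключено в скобки"""
--     if not expression.startswith("(") or not expression.endswith(")"):
--         return False
--     # fully parenthesized iff the ')' matching the leading '(' is the last char
--     return _skip_group(expression[1:]) == ""
-- ===== Notes on version B (the rewrite author's own statement) =====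
-- stated objective: alternative
-- what changed: B replaces A's running balance counter by a recursive-descent matcher: after the endpoint checks it recursively skips nested groups to find the suffix following the ')' that matches the leading '(', and returns whether that suffix is empty; no counter is kept.
import Mathlib
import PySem

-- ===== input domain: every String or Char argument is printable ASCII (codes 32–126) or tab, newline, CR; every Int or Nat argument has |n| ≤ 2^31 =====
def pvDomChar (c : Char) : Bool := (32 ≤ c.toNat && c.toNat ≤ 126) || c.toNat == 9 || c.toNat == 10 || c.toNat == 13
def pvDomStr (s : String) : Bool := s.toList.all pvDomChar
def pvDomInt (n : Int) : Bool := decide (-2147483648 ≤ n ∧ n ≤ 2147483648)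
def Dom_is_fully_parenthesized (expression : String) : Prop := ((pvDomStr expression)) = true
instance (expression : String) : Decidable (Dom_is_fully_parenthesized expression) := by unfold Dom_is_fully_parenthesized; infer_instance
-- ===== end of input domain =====

-- B replaces A's balance counter by a recursive-descent matcher that skips nested groups
-- and checks that the ')' matching the leading '(' is the last character (alternative decomposition, same linear cost in calls).

-- ===== PORT A =====
-- A's enumerate loop with the early return, carrying the index i and n = len(expression)
def pvALoop : List Char → Int → Int → Int → Bool
  | [], _, _, balance => balance == 0
  | c :: rest, i, n, balance =>
    if c = '(' then pvALoop rest (i + 1) n (balance + 1)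
    else if c = ')' then
      if (balance - 1 == 0) && (i < n - 1) then false
      else pvALoop rest (i + 1) n (balance - 1)
    else pvALoop rest (i + 1) n balance

def is_fully_parenthesized (expression : String) : Bool :=
  if !PySem.Str.startswith expression "(" || !PySem.Str.endswith expression ")" then false
  else pvALoop expression.toList 0 (PySem.Str.len expression) 0

-- ===== PORT B =====
-- Source B's _skip_group: s follows an unmatched '('; return the suffix after its matching ')',
-- or none if it is never closed.  The fuel argument only makes the nested recursion total
-- (the recursive call returns a shorter suffix, proved in pvSkip lemmas below); with
-- fuel ≥ s.length it never runs out, so the algorithm is Source B's.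
def pvSkipGroup : Nat → List Char → Option (List Char)
  | 0, _ => none
  | _ + 1, [] => none
  | f + 1, c :: rest =>
    if c = ')' then some rest
    else if c = '(' then
      match pvSkipGroup f rest with
      | none => none
      | some s' => pvSkipGroup f s'
    else pvSkipGroup f rest

def is_fully_parenthesized_alt (expression : String) : Bool :=
  if !PySem.Str.startswith expression "(" || !PySem.Str.endswith expression ")" then false
  else
    let t := PySem.List.slice expression.toList (some 1) none
    pvSkipGroup t.length t == some []

-- ===== PRECONDITION & SPEC =====
def Spec_is_fully_parenthesized (expression : String) (out : Bool) : Prop := out = is_fully_parenthesized_alt expression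
instance (expression : String) (out : Bool) : Decidable (Spec_is_fully_parenthesized expression out) := by unfold Spec_is_fully_parenthesized; infer_instance

-- ===== CLAIM (what is proved, stated in full; the proofs are below) =====
def Claim_equal_is_fully_parenthesized : Prop := ∀ (expression : String), Dom_is_fully_parenthesized expression → Spec_is_fully_parenthesized expression (is_fully_parenthesized expression)

-- ===== LEMMAS AND PROOFS =====

-- counter reformulation of the matcher: suffix after the first ')' at relative depth 0
def pvScan : List Char → Int → Option (List Char)
  | [], _ => none
  | c :: rest, d =>
    if c = ')' then (if d = 0 then some rest else pvScan rest (d - 1))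
    else if c = '(' then pvScan rest (d + 1)
    else pvScan rest d

-- A's loop with the index test i < n - 1 replaced by "rest is nonempty"
def pvStrict : List Char → Int → Bool
  | [], balance => balance == 0
  | c :: rest, balance =>
    if c = '(' then pvStrict rest (balance + 1)
    else if c = ')' then
      if (balance - 1 == 0) && !rest.isEmpty then false
      else pvStrict rest (balance - 1)
    else pvStrict rest balance

theorem pvALoop_eq_strict (cs : List Char) : ∀ (i n b : Int), i + cs.length = n →
    pvALoop cs i n b = pvStrict cs b := by
  induction cs with
  | nil => intro i n b _; rfl
  | cons c rest ih =>
    intro i n b h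
    have hlt : (decide (i < n - 1)) = !rest.isEmpty := by
      cases rest
      · simp_all
      · simp_all; omega
    rw [pvALoop, pvStrict, hlt]
    split_ifs with h1 h2
    · exact ih (i + 1) n _ (by simp at h ⊢; omega)
    · rfl
    · exact ih (i + 1) n _ (by simp at h ⊢; omega)
    · exact ih (i + 1) n _ (by simp at h ⊢; omega)

theorem pvScan_length : ∀ (l : List Char) (d : Int) (r : List Char),
    pvScan l d = some r → r.length < l.length := by
  intro l
  induction l with
  | nil => intro d r h; simp [pvScan] at h
  | cons c rest ih =>
    intro d r h
    rw [pvScan] at h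
    split_ifs at h with h1 h2 h3
    · simp at h; subst h; simp
    · exact Nat.lt_trans (ih _ _ h) (by simp)
    · exact Nat.lt_trans (ih _ _ h) (by simp)
    · exact Nat.lt_trans (ih _ _ h) (by simp)

-- raising the depth composes: skip one group, then continue at the old depth
theorem pvScan_succ (l : List Char) : ∀ d : Int, 0 ≤ d →
    pvScan l (d + 1) = (pvScan l d).bind (fun s' => pvScan s' 0) := by
  induction l with
  | nil => intro d _; simp [pvScan]
  | cons c rest ih =>
    intro d hd
    by_cases h1 : c = ')'
    · by_cases h2 : d = 0
      · simp [pvScan, h1, h2]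
      · have : ¬ (d + 1 = 0) := by omega
        rw [pvScan, if_pos h1, if_neg this, pvScan, if_pos h1, if_neg h2,
          show d + 1 - 1 = (d - 1) + 1 from by ring, ih (d - 1) (by omega)]
    · by_cases h2 : c = '('
      · rw [pvScan, if_neg h1, if_pos h2, show d + 1 + 1 = (d + 1) + 1 from rfl,
          ih (d + 1) (by omega), pvScan, if_neg h1, if_pos h2]
      · rw [pvScan, if_neg h1, if_neg h2, ih d hd, pvScan, if_neg h1, if_neg h2]

-- with enough fuel the recursive matcher is the depth-0 scan
theorem pvSkipGroup_eq_scan : ∀ (f : Nat) (l : List Char), l.length ≤ f →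
    pvSkipGroup f l = pvScan l 0 := by
  intro f
  induction f with
  | zero => intro l h; simp at h; simp [h, pvSkipGroup, pvScan]
  | succ f ih =>
    intro l h
    cases l with
    | nil => simp [pvSkipGroup, pvScan]
    | cons c rest =>
      simp only [List.length_cons] at h
      have hr : rest.length ≤ f := by omega
      by_cases h1 : c = ')'
      · simp [pvSkipGroup, pvScan, h1]
      · by_cases h2 : c = '('
        · rw [pvSkipGroup, if_neg h1, if_pos h2, pvScan, if_neg h1, if_pos h2,
            show (0:Int) + 1 = 0 + 1 from rfl, pvScan_succ rest 0 (le_refl _), ih rest hr]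
          cases hs : pvScan rest 0 with
          | none => rfl
          | some s' =>
            have := pvScan_length rest 0 s' hs
            simpa using ih s' (by omega)
        · rw [pvSkipGroup, if_neg h1, if_neg h2, pvScan, if_neg h1, if_neg h2, ih rest hr]

-- A's strict loop at positive balance ↔ the scan at depth balance-1 ends exactly at the last char
theorem pvStrict_eq_scan (t : List Char) : ∀ b : Int, 0 < b →
    pvStrict t b = (pvScan t (b - 1) == some []) := by
  induction t with
  | nil =>
    intro b hb
    have : ¬ (b = 0) := by omega
    simp [pvStrict, pvScan, this]
  | cons c rest ih =>
    intro b hb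
    by_cases h1 : c = '('
    · rw [pvStrict, if_pos h1, ih (b + 1) (by omega), pvScan, if_neg (by simp [h1]), if_pos h1,
        show b + 1 - 1 = b - 1 + 1 from by ring]
    · by_cases h2 : c = ')'
      · rw [pvStrict, if_neg h1, if_pos h2, pvScan, if_pos h2]
        by_cases h3 : b - 1 = 0
        · rw [if_pos h3]
          cases rest with
          | nil => simp [pvStrict, h3]
          | cons c' r' => simp [h3]
        · rw [if_neg h3, if_neg (show ¬ (((b - 1 == 0) && !rest.isEmpty) = true) from by simp [h3]),
            ih (b - 1) (by omega)]
      · rw [pvStrict, if_neg h1, if_neg h2, ih b hb, pvScan, if_neg h2, if_neg h1]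

-- ===== VERDICT (by name: the statement is the Claim_ definition above) =====
theorem is_fully_parenthesized_spec : Claim_equal_is_fully_parenthesized := by
  intro e _
  unfold Spec_is_fully_parenthesized is_fully_parenthesized is_fully_parenthesized_alt
  cases hs : PySem.Str.startswith e "(" with
  | false => simp
  | true =>
    cases he : PySem.Str.endswith e ")" with
    | false => simp
    | true =>
      simp only [Bool.not_true, Bool.or_false, Bool.false_eq_true, if_false]
      have hsc : PySem.Chars.startswith e.toList ['('] = true := by simpa using hs
      obtain ⟨t, ht⟩ := (PySem.Chars.startswith_iff e.toList ['(']).mp hsc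
      simp only [List.singleton_append] at ht
      rw [pvALoop_eq_strict e.toList 0 (PySem.Str.len e) 0 (by simp), ← ht]
      have hslice : PySem.List.slice ('(' :: t) (some 1) none = t := by
        simp [PySem.List.slice_from]
      rw [hslice, pvSkipGroup_eq_scan t.length t (le_refl _),
        pvStrict, if_pos rfl, pvStrict_eq_scan t (0 + 1) (by omega),
        show (0:Int) + 1 - 1 = 0 from by ring]
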